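-- pv_equiv track=rewrite | github.com/jjrivas/HackerRank | Python/Capitalize/Capitalize.py | solve
-- ===== SOURCE A (Python) =====
-- def solve(s):
--     l = ''
--     prior_space = True
--
--     for x in s:
--         if(prior_space and x.isalpha()):
--             l += x.upper()
--             prior_space = False
--
--         elif(x.isspace()):
--             prior_space = True
--             l += x
--
--         else:
--             prior_space = False
--             l += x
--
--     return l
-- ===== SOURCE B (Python) =====
-- from itertools import groupby
--
-- def solve(s):
--     pieces = []
--     for is_space, grp in groupby(s, str.isspace):
--         seg = ''.join(grp)
--         pieces.append(seg if is_space else seg[0].upper() + seg[1:])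
--     return ''.join(pieces)
-- ===== Notes on version B (the rewrite author's own statement) =====
-- stated objective: idiomatic
-- what changed: Replaces the char-by-char state machine with a prior_space flag by an itertools.groupby split into whitespace/non-whitespace runs, uppercasing the first char of each non-whitespace run (upper() is a no-op on non-letters).
import Mathlib
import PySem

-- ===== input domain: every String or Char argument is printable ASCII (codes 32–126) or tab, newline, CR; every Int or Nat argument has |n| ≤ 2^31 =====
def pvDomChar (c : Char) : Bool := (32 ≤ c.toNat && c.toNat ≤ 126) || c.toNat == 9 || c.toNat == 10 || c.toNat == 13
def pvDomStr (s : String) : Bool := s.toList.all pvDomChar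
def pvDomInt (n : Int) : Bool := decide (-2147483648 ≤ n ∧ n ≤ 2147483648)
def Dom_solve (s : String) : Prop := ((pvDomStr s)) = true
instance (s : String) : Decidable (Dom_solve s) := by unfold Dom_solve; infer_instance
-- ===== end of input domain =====

-- B replaces A's char-by-char prior_space state machine by a groupby-style split into
-- whitespace/non-whitespace runs, uppercasing the first char of each non-whitespace run
-- (upper() is a no-op on non-letters); same output, different decomposition.

-- ===== PORT A =====
-- A-side helper: the body of A's for loop; state = (l, prior_space)
def solveStep (st : List Char × Bool) (x : Char) : List Char × Bool :=
  if st.2 && PySem.Chars.isalpha x then (st.1 ++ [PySem.Chars.upperChar x], false)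
  else if PySem.Chars.isspace x then (st.1 ++ [x], true)
  else (st.1 ++ [x], false)

def solve (s : String) : String :=
  String.mk (s.toList.foldl solveStep ([], true)).1

-- ===== PORT B =====
-- groupby(s, str.isspace): takeRun k cs splits off the longest prefix whose isspace equals k
def takeRun (k : Bool) : List Char → List Char × List Char
  | [] => ([], [])
  | c :: cs =>
    if PySem.Chars.isspace c = k then
      let p := takeRun k cs
      (c :: p.1, p.2)
    else ([], c :: cs)

lemma takeRun_snd_length (k : Bool) (cs : List Char) : (takeRun k cs).2.length ≤ cs.length := by
  induction cs with
  | nil => simp [takeRun]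
  | cons c cs ih =>
    simp only [takeRun]
    split
    · exact Nat.le_succ_of_le ih
    · simp

-- the alternating (key, run) groups, as itertools.groupby yields them
def groups : List Char → List (Bool × List Char)
  | [] => []
  | c :: cs =>
    let k := PySem.Chars.isspace c
    let p := takeRun k cs
    (k, c :: p.1) :: groups p.2
termination_by cs => cs.length
decreasing_by exact Nat.lt_succ_of_le (takeRun_snd_length _ _)

-- seg[0].upper() + seg[1:]
def upperFirst : List Char → List Char
  | [] => []
  | c :: cs => PySem.Chars.upperChar c :: cs

def solve_alt (s : String) : String :=
  String.mk (((groups s.toList).map (fun g => if g.1 then g.2 else upperFirst g.2)).flatten)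

-- ===== PRECONDITION & SPEC =====
def Spec_solve (s : String) (out : String) : Prop := out = solve_alt s
instance (s : String) (out : String) : Decidable (Spec_solve s out) := by unfold Spec_solve; infer_instance

-- ===== CLAIM (what is proved, stated in full; the proofs are below) =====
def Claim_equal_solve : Prop := ∀ (s : String), Dom_solve s → Spec_solve s (solve s)

-- ===== LEMMAS AND PROOFS =====

-- A's loop as a structural recursion (the Bool argument is prior_space)
def go (p : Bool) : List Char → List Char
  | [] => []
  | c :: cs =>
    if p && PySem.Chars.isalpha c then PySem.Chars.upperChar c :: go false cs
    else if PySem.Chars.isspace c then c :: go true cs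
    else c :: go false cs

lemma charLe_toNat {a b : Char} (h : a ≤ b) : a.toNat ≤ b.toNat := by
  rw [Char.le_def, UInt32.le_iff_toNat_le] at h
  exact h

lemma isalpha_of_isspace {c : Char} (h : PySem.Chars.isspace c = true) :
    PySem.Chars.isalpha c = false := by
  by_contra hne
  have ha : PySem.Chars.isalpha c = true := by simpa using hne
  simp only [PySem.Chars.isalpha, PySem.Chars.isupper, PySem.Chars.islower,
    Bool.or_eq_true, Bool.and_eq_true, decide_eq_true_eq] at ha
  simp only [PySem.Chars.isspace, Bool.or_eq_true, Bool.and_eq_true, decide_eq_true_eq] at h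
  have eA : ('A' : Char).toNat = 65 := by decide
  have eZ : ('Z' : Char).toNat = 90 := by decide
  have ea : ('a' : Char).toNat = 97 := by decide
  have ez : ('z' : Char).toNat = 122 := by decide
  rcases ha with ⟨h1, h2⟩ | ⟨h1, h2⟩ <;>
  · have a1 := charLe_toNat h1
    have a2 := charLe_toNat h2
    rw [eA] at *; rw [eZ] at *; rw [ea] at *; rw [ez] at *
    omega

lemma islower_of_isalpha_false {c : Char} (h : PySem.Chars.isalpha c = false) :
    PySem.Chars.islower c = false := by
  simp only [PySem.Chars.isalpha, Bool.or_eq_false_iff] at h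
  exact h.2

lemma upperChar_of_not_isalpha {c : Char} (h : PySem.Chars.isalpha c = false) :
    PySem.Chars.upperChar c = c := by
  simp [PySem.Chars.upperChar, islower_of_isalpha_false h]

lemma foldl_eq_go (cs : List Char) : ∀ (l : List Char) (p : Bool),
    (cs.foldl solveStep (l, p)).1 = l ++ go p cs := by
  induction cs with
  | nil => intro l p; simp [go]
  | cons c cs ih =>
    intro l p
    rw [List.foldl_cons]
    by_cases h1 : (p && PySem.Chars.isalpha c) = true
    · rw [show solveStep (l, p) c = (l ++ [PySem.Chars.upperChar c], false) from by
        simp [solveStep, h1]]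
      rw [ih]
      simp [go, h1]
    · by_cases h2 : PySem.Chars.isspace c = true
      · rw [show solveStep (l, p) c = (l ++ [c], true) from by simp [solveStep, h1, h2]]
        rw [ih]
        simp [go, h1, h2]
      · rw [show solveStep (l, p) c = (l ++ [c], false) from by simp [solveStep, h1, h2]]
        rw [ih]
        simp [go, h1, h2]

lemma go_space_run (r : List Char) (t : List Char)
    (h : ∀ x ∈ r, PySem.Chars.isspace x = true) :
    go true (r ++ t) = r ++ go true t := by
  induction r with
  | nil => simp
  | cons c r ih =>
    have hc : PySem.Chars.isspace c = true := h c (by simp)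
    have ha := isalpha_of_isspace hc
    simp only [List.cons_append, go, ha, Bool.and_false, hc, if_true]
    rw [ih (fun x hx => h x (List.mem_cons_of_mem _ hx))]
    simp

lemma go_nonspace_run (r : List Char) (t : List Char)
    (h : ∀ x ∈ r, PySem.Chars.isspace x = false) :
    go false (r ++ t) = r ++ go false t := by
  induction r with
  | nil => simp
  | cons c r ih =>
    have hc : PySem.Chars.isspace c = false := h c (by simp)
    simp only [List.cons_append, go, Bool.false_and, hc]
    rw [ih (fun x hx => h x (List.mem_cons_of_mem _ hx))]
    simp

lemma go_false_eq_true (t : List Char)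
    (h : ∀ c cs, t = c :: cs → PySem.Chars.isspace c = true) :
    go false t = go true t := by
  cases t with
  | nil => rfl
  | cons c cs =>
    have hc := h c cs rfl
    simp [go, hc, isalpha_of_isspace hc]

lemma takeRun_mem (k : Bool) (cs : List Char) :
    ∀ x ∈ (takeRun k cs).1, PySem.Chars.isspace x = k := by
  induction cs with
  | nil => simp [takeRun]
  | cons c cs ih =>
    intro x hx
    by_cases h : PySem.Chars.isspace c = k
    · simp only [takeRun, if_pos h] at hx
      cases hx with
      | head => exact h
      | tail _ hx' => exact ih x hx'
    · simp [takeRun, if_neg h] at hx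

lemma takeRun_append (k : Bool) (cs : List Char) :
    (takeRun k cs).1 ++ (takeRun k cs).2 = cs := by
  induction cs with
  | nil => simp [takeRun]
  | cons c cs ih =>
    by_cases h : PySem.Chars.isspace c = k
    · simp only [takeRun, if_pos h, List.cons_append]
      rw [ih]
    · simp [takeRun, if_neg h]

lemma takeRun_snd_head (k : Bool) (cs : List Char) :
    ∀ c t, (takeRun k cs).2 = c :: t → PySem.Chars.isspace c ≠ k := by
  induction cs with
  | nil => simp [takeRun]
  | cons c cs ih =>
    intro d t hdt
    by_cases h : PySem.Chars.isspace c = k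
    · exact ih d t (by simpa [takeRun, if_pos h] using hdt)
    · simp only [takeRun, if_neg h] at hdt
      injection hdt with h1 h2
      exact h1 ▸ h

lemma go_eq_groups : ∀ (n : Nat) (cs : List Char), cs.length ≤ n →
    go true cs =
      ((groups cs).map (fun g => if g.1 then g.2 else upperFirst g.2)).flatten := by
  intro n
  induction n with
  | zero =>
    intro cs h
    have : cs = [] := List.eq_nil_of_length_eq_zero (Nat.le_zero.mp h)
    subst this
    simp [groups, go]
  | succ n ih =>
    intro cs h
    cases cs with
    | nil => simp [groups, go]
    | cons c cs =>
      rw [groups]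
      set k := PySem.Chars.isspace c with hk
      have hrest := ih (takeRun k cs).2
        (le_trans (takeRun_snd_length k cs) (Nat.le_of_succ_le_succ h))
      have hsplit := takeRun_append k cs
      simp only [List.map_cons, List.flatten_cons]
      rw [← hrest]
      by_cases hks : k = true
      · -- whitespace run: emitted unchanged
        have hc : PySem.Chars.isspace c = true := hk ▸ hks
        have heq : go true (c :: cs) = c :: (takeRun k cs).1 ++ go true (takeRun k cs).2 := by
          conv_lhs => rw [← hsplit]
          simp only [List.cons_append, go, isalpha_of_isspace hc, Bool.and_false, hc, if_true]
          rw [go_space_run _ _ (fun x hx => hks ▸ takeRun_mem k cs x hx)]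
          all_goals simp
        rw [heq, if_pos hks]
      · -- non-whitespace run: first char uppercased
        have hk' : k = false := Bool.eq_false_iff.mpr hks
        have hc : PySem.Chars.isspace c = false := hk ▸ hk'
        have hft : go false (takeRun k cs).2 = go true (takeRun k cs).2 := by
          apply go_false_eq_true
          intro d t hdt
          have hne := takeRun_snd_head k cs d t hdt
          rw [hk'] at hne
          simpa using hne
        have heq : go true (c :: cs) =
            (PySem.Chars.upperChar c :: (takeRun k cs).1) ++ go false (takeRun k cs).2 := by
          conv_lhs => rw [← hsplit]
          by_cases hac : PySem.Chars.isalpha c = true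
          · simp only [List.cons_append, go, hac, Bool.and_true, if_true]
            rw [go_nonspace_run _ _ (fun x hx => hk' ▸ takeRun_mem k cs x hx)]
          · have ha' : PySem.Chars.isalpha c = false := Bool.eq_false_iff.mpr hac
            simp only [List.cons_append, go, ha', Bool.and_false, hc,
              upperChar_of_not_isalpha ha']
            rw [go_nonspace_run _ _ (fun x hx => hk' ▸ takeRun_mem k cs x hx)]
            all_goals simp
        rw [heq, hft, if_neg hks]
        all_goals simp [upperFirst]

-- ===== VERDICT (by name: the statement is the Claim_ definition above) =====
theorem solve_spec : Claim_equal_solve := by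
  intro s _
  unfold Spec_solve solve solve_alt
  rw [foldl_eq_go]
  rw [go_eq_groups s.toList.length s.toList le_rfl]
  simp
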